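-- pv_equiv track=rewrite | github.com/j1642/project-euler | project_euler/36-base_10_2_palindromes.py | is_pal_base_2_convert
-- ===== SOURCE A (Python) =====
-- def is_pal_base_2_convert(num):
--     '''Convert number to binary and return True if it is binary palindrome.
--     Can also use format(<number>, 'b') to convert to binary.'''
--     # Use list as stack
--     binary_stack = []
--     num_orig = num
--     while num > 0:
--         binary_stack.append(str(num % 2))
--         num = num // 2
--     # Reverse binary stack to gt binary num
--     binary_num = list(reversed(binary_stack))
--     if binary_num == binary_stack:
--         return True
--     return False
-- ===== SOURCE B (Python) =====
-- def is_pal_base_2_convert(num):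
--     '''Compare num with its numerically bit-reversed value (no lists built).
--     Non-positive numbers have no binary digits, hence vacuously palindromic
--     (same as A, whose loop never runs there).'''
--     if num <= 0:
--         return True
--     rev, n = 0, num
--     while n > 0:
--         rev = rev * 2 + n % 2
--         n //= 2
--     return rev == num
-- ===== Notes on version B (the rewrite author's own statement) =====
-- stated objective: simpler
-- what changed: Replaces building a list of digit strings and comparing it with its reversal by a single numeric loop that accumulates the bit-reversed integer and compares it with the original number.
import Mathlib
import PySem

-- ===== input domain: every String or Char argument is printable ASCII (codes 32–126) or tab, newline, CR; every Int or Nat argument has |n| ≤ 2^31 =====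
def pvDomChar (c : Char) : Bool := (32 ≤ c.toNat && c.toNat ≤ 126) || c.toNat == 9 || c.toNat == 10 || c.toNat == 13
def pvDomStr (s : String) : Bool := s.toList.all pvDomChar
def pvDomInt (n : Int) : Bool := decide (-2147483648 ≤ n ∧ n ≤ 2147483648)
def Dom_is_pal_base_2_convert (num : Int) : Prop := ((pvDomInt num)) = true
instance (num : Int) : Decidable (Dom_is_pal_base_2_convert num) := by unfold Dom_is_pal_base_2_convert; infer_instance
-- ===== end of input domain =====

-- B replaces A's list-of-digit-strings palindrome test by a numeric bit-reversal accumulator (objective: simpler).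

-- ===== PORT A =====
-- the `while num > 0` loop: append str(num % 2), num //= 2
def pvAStack (num : Int) (stack : List String) : List String :=
  if num > 0 then
    pvAStack (PySem.Int.floordiv num 2) (stack ++ [PySem.Int.toStr (PySem.Int.mod num 2)])
  else stack
termination_by num.toNat
decreasing_by
  rw [PySem.Int.floordiv_eq_ediv_of_pos (by omega : (0:Int) < 2)]
  omega

def is_pal_base_2_convert (num : Int) : Bool :=
  let binary_stack := pvAStack num []
  let binary_num := binary_stack.reverse
  if binary_num = binary_stack then true else false

-- ===== PORT B =====
-- the `while n > 0` loop: rev = rev * 2 + n % 2, n //= 2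
def pvBRev (n : Int) (rev : Int) : Int :=
  if n > 0 then pvBRev (PySem.Int.floordiv n 2) (rev * 2 + PySem.Int.mod n 2)
  else rev
termination_by n.toNat
decreasing_by
  rw [PySem.Int.floordiv_eq_ediv_of_pos (by omega : (0:Int) < 2)]
  omega

def is_pal_base_2_convert_alt (num : Int) : Bool :=
  if num ≤ 0 then true
  else decide (pvBRev num 0 = num)

-- ===== PRECONDITION & SPEC =====
def Spec_is_pal_base_2_convert (num : Int) (out : Bool) : Prop := out = is_pal_base_2_convert_alt num
instance (num : Int) (out : Bool) : Decidable (Spec_is_pal_base_2_convert num out) := by unfold Spec_is_pal_base_2_convert; infer_instance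

-- ===== CLAIM (what is proved, stated in full; the proofs are below) =====
def Claim_equal_is_pal_base_2_convert : Prop := ∀ (num : Int), Dom_is_pal_base_2_convert num → Spec_is_pal_base_2_convert num (is_pal_base_2_convert num)

-- ===== LEMMAS AND PROOFS =====

-- the LSB-first binary digit list of n, as integers
def pvDigits (n : Int) : List Int :=
  if n > 0 then PySem.Int.mod n 2 :: pvDigits (PySem.Int.floordiv n 2) else []
termination_by n.toNat
decreasing_by
  rw [PySem.Int.floordiv_eq_ediv_of_pos (by omega : (0:Int) < 2)]
  omega

-- value of an LSB-first digit list
def pvVal : List Int → Int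
  | [] => 0
  | d :: ds => d + 2 * pvVal ds

theorem pvAStack_eq (n : Int) (s : List String) :
    pvAStack n s = s ++ (pvDigits n).map PySem.Int.toStr := by
  fun_induction pvAStack n s with
  | case1 n s h ih =>
    rw [ih]
    conv_rhs => rw [pvDigits, if_pos h]
    simp
  | case2 n s h =>
    rw [pvDigits, if_neg h]
    simp

theorem pvDigits_val (n : Int) (h : 0 ≤ n) : pvVal (pvDigits n) = n := by
  fun_induction pvDigits n with
  | case1 n h1 ih =>
    have hq : 0 ≤ PySem.Int.floordiv n 2 := by
      rw [PySem.Int.floordiv_eq_ediv_of_pos (by omega : (0:Int) < 2)]; omega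
    have := PySem.Int.floordiv_mul_add_mod n 2
    simp only [pvVal, ih hq]
    omega
  | case2 n h1 => simp only [pvVal]; omega

theorem pvDigits_binary (n : Int) : ∀ d ∈ pvDigits n, d = 0 ∨ d = 1 := by
  fun_induction pvDigits n with
  | case1 n h ih =>
    intro d hd
    rcases List.mem_cons.mp hd with h1 | h1
    · have h2 : PySem.Int.mod n 2 = n % 2 :=
        PySem.Int.mod_eq_emod_of_pos (by omega)
      subst h1; rw [h2]; omega
    · exact ih d h1
  | case2 n h => intro d hd; simp at hd

theorem pvVal_append (L : List Int) (d : Int) :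
    pvVal (L ++ [d]) = pvVal L + d * 2 ^ L.length := by
  induction L with
  | nil => simp [pvVal]
  | cons x xs ih => simp [pvVal, ih, pow_succ]; ring

theorem pvBRev_eq (n rev : Int) :
    pvBRev n rev = rev * 2 ^ (pvDigits n).length + pvVal (pvDigits n).reverse := by
  fun_induction pvBRev n rev with
  | case1 n rev h ih =>
    rw [pvDigits, if_pos h]
    simp only [List.length_cons, List.reverse_cons, pvVal_append, List.length_reverse, ih,
      pow_succ]
    ring
  | case2 n rev h =>
    rw [pvDigits, if_neg h]
    simp [pvVal]

theorem pvVal_inj : ∀ (L M : List Int), L.length = M.length →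
    (∀ d ∈ L, d = 0 ∨ d = 1) → (∀ d ∈ M, d = 0 ∨ d = 1) →
    pvVal L = pvVal M → L = M := by
  intro L
  induction L with
  | nil => intro M hl _ _ _; cases M with
    | nil => rfl
    | cons y ys => simp at hl
  | cons x xs ih =>
    intro M hl hL hM hv
    cases M with
    | nil => simp at hl
    | cons y ys =>
      have hx := hL x (by simp)
      have hy := hM y (by simp)
      simp only [pvVal] at hv
      have hxy : x = y ∧ pvVal xs = pvVal ys := by omega
      have : xs = ys := ih ys (by simpa using hl)
        (fun d hd => hL d (by simp [hd])) (fun d hd => hM d (by simp [hd])) hxy.2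
      rw [hxy.1, this]

theorem pvMap_toStr_inj : ∀ (L M : List Int),
    (∀ d ∈ L, d = 0 ∨ d = 1) → (∀ d ∈ M, d = 0 ∨ d = 1) →
    L.map PySem.Int.toStr = M.map PySem.Int.toStr → L = M := by
  intro L
  induction L with
  | nil => intro M _ _ h; cases M <;> simp_all
  | cons x xs ih =>
    intro M hL hM h
    cases M with
    | nil => simp at h
    | cons y ys =>
      simp only [List.map_cons, List.cons.injEq] at h
      have hx := hL x (by simp)
      have hy := hM y (by simp)
      have h01 : PySem.Int.toStr 0 ≠ PySem.Int.toStr 1 := by decide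
      have hxy : x = y := by
        rcases hx with rfl | rfl <;> rcases hy with rfl | rfl
        · rfl
        · exact absurd h.1 h01
        · exact absurd h.1 (Ne.symm h01)
        · rfl
      have : xs = ys := ih ys (fun d hd => hL d (by simp [hd]))
        (fun d hd => hM d (by simp [hd])) h.2
      rw [hxy, this]

-- ===== VERDICT (by name: the statement is the Claim_ definition above) =====
theorem is_pal_base_2_convert_spec : Claim_equal_is_pal_base_2_convert := by
  intro num _
  unfold Spec_is_pal_base_2_convert is_pal_base_2_convert is_pal_base_2_convert_alt
  by_cases h : num ≤ 0
  · have h0 : ¬ num > 0 := by omega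
    rw [pvAStack, if_neg h0]
    simp [h]
  · rw [if_neg h]
    have hbin := pvDigits_binary num
    have hval : pvVal (pvDigits num) = num := pvDigits_val num (by omega)
    have hB : pvBRev num 0 = pvVal (pvDigits num).reverse := by
      rw [pvBRev_eq]; ring
    have hA : pvAStack num [] = (pvDigits num).map PySem.Int.toStr := by
      rw [pvAStack_eq]; simp
    have hiff : ((pvDigits num).map PySem.Int.toStr).reverse
          = (pvDigits num).map PySem.Int.toStr
        ↔ pvVal (pvDigits num).reverse = pvVal (pvDigits num) := by
      rw [← List.map_reverse]
      constructor
      · intro he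
        rw [pvMap_toStr_inj _ _ (fun d hd => hbin d (List.mem_reverse.mp hd)) hbin he]
      · intro he
        rw [pvVal_inj _ _ (by simp) (fun d hd => hbin d (List.mem_reverse.mp hd)) hbin he]
    simp only [hA, hB]
    by_cases hc : ((pvDigits num).map PySem.Int.toStr).reverse
        = (pvDigits num).map PySem.Int.toStr
    · rw [if_pos hc]
      have hv := hiff.mp hc
      rw [hval] at hv
      simp [hv]
    · rw [if_neg hc]
      have hv : ¬ pvVal (pvDigits num).reverse = num := fun he =>
        hc (hiff.mpr (by rw [hval]; exact he))
      simp [hv]
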